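-- pv_equiv track=rewrite | github.com/Michael-Rhodes/BrowserTimelineRecovery-Kaminski-Rhodes | btr.py | analyzeTimestamps
-- ===== SOURCE A (Python) =====
-- def analyzeTimestamps(history, cookies, start, end, win):
-- 	discrepancies = []
--
-- 	# loop through cookies and compare each entry to the timestamps in history
-- 	for c in cookies:
-- 		# if creation date doesn't match a timestamp (with a given window)
-- 		# append the cookie to the list
-- 		matchHist = [h for h in history if c[2]-win <= h[2] <= c[2]+win]
--
-- 		# remove history outside the start-end times
-- #		if (start or end):
-- #			if (start):
-- 		if (end):	# both start and end set
-- 			matchHist = [h for h in matchHist if start <= h[2] <= end]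
-- 		else: # only start set
-- 			matchHist = [h for h in matchHist if start <= h[2]]
-- #			else: # only end set
-- #				matchHist = [h for h in matchHist if h[2] <= end]
--
-- 		if len(matchHist) == 0:
-- 			discrepancies.append(c)
-- 	return discrepancies
-- ===== SOURCE B (Python) =====
-- def _bisect_left(ts, x):
--     lo, hi = 0, len(ts)
--     while lo < hi:
--         mid = (lo + hi) // 2
--         if ts[mid] < x:
--             lo = mid + 1
--         else:
--             hi = mid
--     return lo
--
--
-- def analyzeTimestamps(history, cookies, start, end, win):
--     # history timestamps already restricted to [start, end] (or [start, inf) when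
--     # end is falsy), sorted once so each cookie needs only a binary search
--     ts = sorted(h[2] for h in history if start <= h[2] and (not end or h[2] <= end))
--     n = len(ts)
--     discrepancies = []
--     for c in cookies:
--         i = _bisect_left(ts, c[2] - win)
--         if not (i < n and ts[i] <= c[2] + win):
--             discrepancies.append(c)
--     return discrepancies
-- ===== Notes on version B (the rewrite author's own statement) =====
-- stated objective: faster
-- what changed: Instead of rescanning all of history for every cookie, B filters history to the start/end range once, sorts the timestamps, and answers each cookie's window query with a hand-written binary search.
-- outside the precondition, e.g. on analyzeTimestamps([[1, 2]], [], 0, 0, 0): A returns [], B raises IndexError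
import Mathlib
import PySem

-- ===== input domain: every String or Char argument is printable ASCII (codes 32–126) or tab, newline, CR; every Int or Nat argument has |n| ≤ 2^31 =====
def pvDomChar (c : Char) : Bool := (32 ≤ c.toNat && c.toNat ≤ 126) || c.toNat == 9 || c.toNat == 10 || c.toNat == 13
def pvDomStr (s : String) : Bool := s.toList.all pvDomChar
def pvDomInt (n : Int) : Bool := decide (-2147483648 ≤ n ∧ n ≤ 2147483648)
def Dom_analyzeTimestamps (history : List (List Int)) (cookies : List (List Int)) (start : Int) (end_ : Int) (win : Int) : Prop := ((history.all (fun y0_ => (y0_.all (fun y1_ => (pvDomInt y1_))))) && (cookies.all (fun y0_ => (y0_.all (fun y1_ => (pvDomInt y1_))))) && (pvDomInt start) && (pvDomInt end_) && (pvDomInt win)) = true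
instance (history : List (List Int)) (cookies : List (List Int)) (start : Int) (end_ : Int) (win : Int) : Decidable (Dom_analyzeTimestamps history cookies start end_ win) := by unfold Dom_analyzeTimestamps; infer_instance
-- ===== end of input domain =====

-- B replaces A's per-cookie scan of history by one range-filter + sort of the
-- history timestamps and a binary search per cookie (objective: faster).

-- r[2] of a row; inside Pre_ every row has length ≥ 3, so the default is never used
def pvTs (r : List Int) : Int := PySem.List.pyGetD r 2 0

-- ===== PORT A =====
def analyzeTimestamps (history : List (List Int)) (cookies : List (List Int)) (start : Int) (end_ : Int) (win : Int) : List (List Int) :=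
  cookies.foldl (fun discrepancies c =>
    let matchHist := history.filter (fun h =>
      decide (pvTs c - win ≤ pvTs h) && decide (pvTs h ≤ pvTs c + win))
    let matchHist2 :=
      if end_ ≠ 0 then
        matchHist.filter (fun h => decide (start ≤ pvTs h) && decide (pvTs h ≤ end_))
      else
        matchHist.filter (fun h => decide (start ≤ pvTs h))
    if matchHist2.length = 0 then discrepancies ++ [c] else discrepancies) []

-- ===== PORT B =====
def analyzeTimestamps_alt (history : List (List Int)) (cookies : List (List Int)) (start : Int) (end_ : Int) (win : Int) : List (List Int) :=
  let ts := PySem.List.sorted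
    ((history.filter (fun h =>
        decide (start ≤ pvTs h) && (decide (end_ = 0) || decide (pvTs h ≤ end_)))).map pvTs)
    (fun t => t) false
  let n := ts.length
  cookies.foldl (fun discrepancies c =>
    let i := PySem.List.bisectLeft ts (pvTs c - win)
    if ¬ (i < n ∧ ts.getD i 0 ≤ pvTs c + win) then discrepancies ++ [c]
    else discrepancies) []

-- ===== PRECONDITION & SPEC =====
-- Pre_ excludes rows of length < 3, on which c[2]/h[2] raise IndexError; it also
-- excludes the corner where cookies = [] and some history row is short — there A
-- returns [] without ever touching history, while B's one-shot filter reads h[2].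
def Pre_analyzeTimestamps (history : List (List Int)) (cookies : List (List Int)) (start : Int) (end_ : Int) (win : Int) : Prop :=
  (∀ r ∈ history, 3 ≤ r.length) ∧ (∀ r ∈ cookies, 3 ≤ r.length)
instance (history : List (List Int)) (cookies : List (List Int)) (start : Int) (end_ : Int) (win : Int) : Decidable (Pre_analyzeTimestamps history cookies start end_ win) := by unfold Pre_analyzeTimestamps; infer_instance

def pvWitness_analyzeTimestamps : List (List Int) × List (List Int) × Int × Int × Int :=
  ([[1, 0, 5]], [[2, 0, 9]], 0, 10, 1)

def Spec_analyzeTimestamps (history : List (List Int)) (cookies : List (List Int)) (start : Int) (end_ : Int) (win : Int) (out : List (List Int)) : Prop := out = analyzeTimestamps_alt history cookies start end_ win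
instance (history : List (List Int)) (cookies : List (List Int)) (start : Int) (end_ : Int) (win : Int) (out : List (List Int)) : Decidable (Spec_analyzeTimestamps history cookies start end_ win out) := by unfold Spec_analyzeTimestamps; infer_instance

-- ===== CLAIM (what is proved, stated in full; the proofs are below) =====
def Claim_equal_analyzeTimestamps : Prop := ∀ (history : List (List Int)) (cookies : List (List Int)) (start : Int) (end_ : Int) (win : Int), Dom_analyzeTimestamps history cookies start end_ win → Pre_analyzeTimestamps history cookies start end_ win → Spec_analyzeTimestamps history cookies start end_ win (analyzeTimestamps history cookies start end_ win)

-- ===== LEMMAS AND PROOFS =====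

-- B's binary-search hit test on the sorted list decides existence in the window
lemma bisect_hit_iff (ts : List Int) (lo hi : Int)
    (hs : ts.Pairwise (fun a b => a ≤ b)) :
    (PySem.List.bisectLeft ts lo < ts.length ∧
      ts.getD (PySem.List.bisectLeft ts lo) 0 ≤ hi) ↔
    ∃ t ∈ ts, lo ≤ t ∧ t ≤ hi := by
  obtain ⟨hle, hlt, hge⟩ := PySem.List.bisectLeft_spec ts lo hs
  set i := PySem.List.bisectLeft ts lo with hi_def
  constructor
  · rintro ⟨hin, hval⟩
    refine ⟨ts[i], List.getElem_mem hin, hge i hin le_rfl, ?_⟩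
    rwa [List.getD_eq_getElem ts 0 hin] at hval
  · rintro ⟨t, ht, hlo, hhi⟩
    obtain ⟨j, hj, rfl⟩ := List.getElem_of_mem ht
    have hij : i ≤ j := by
      by_contra h
      exact absurd hlo (not_le.mpr (hlt j hj (not_le.mp h)))
    have hin : i < ts.length := lt_of_le_of_lt hij hj
    refine ⟨hin, ?_⟩
    rw [List.getD_eq_getElem ts 0 hin]
    have : ts[i] ≤ ts[j] := by
      rcases eq_or_lt_of_le hij with h | h
      · simp [h]
      · exact (List.pairwise_iff_getElem.mp hs) i j hin hj h
    exact le_trans this hhi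

-- existence of a suitable timestamp, read off B's sorted filtered list
lemma mem_ts_iff (history : List (List Int)) (p : List Int → Bool) (lo hi : Int) :
    (∃ t ∈ PySem.List.sorted ((history.filter p).map pvTs) (fun t => t) false,
        lo ≤ t ∧ t ≤ hi) ↔
    ∃ h ∈ history, p h ∧ lo ≤ pvTs h ∧ pvTs h ≤ hi := by
  constructor
  · rintro ⟨t, ht, h1, h2⟩
    rw [PySem.List.mem_sorted] at ht
    obtain ⟨h, hh, rfl⟩ := List.mem_map.mp ht
    obtain ⟨hmem, hp⟩ := List.mem_filter.mp hh
    exact ⟨h, hmem, hp, h1, h2⟩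
  · rintro ⟨h, hmem, hp, h1, h2⟩
    refine ⟨pvTs h, ?_, h1, h2⟩
    rw [PySem.List.mem_sorted]
    exact List.mem_map_of_mem (List.mem_filter.mpr ⟨hmem, hp⟩)

-- A's per-cookie emptiness test coincides with B's binary-search miss test
lemma cond_iff (history : List (List Int)) (start end_ win : Int) (c : List Int) :
    ((if end_ ≠ 0 then
        (history.filter (fun h =>
          decide (pvTs c - win ≤ pvTs h) && decide (pvTs h ≤ pvTs c + win))).filter
          (fun h => decide (start ≤ pvTs h) && decide (pvTs h ≤ end_))
      else
        (history.filter (fun h =>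
          decide (pvTs c - win ≤ pvTs h) && decide (pvTs h ≤ pvTs c + win))).filter
          (fun h => decide (start ≤ pvTs h))).length = 0) ↔
    ¬ (PySem.List.bisectLeft
          (PySem.List.sorted ((history.filter (fun h =>
            decide (start ≤ pvTs h) && (decide (end_ = 0) || decide (pvTs h ≤ end_)))).map pvTs)
            (fun t => t) false)
          (pvTs c - win) <
        (PySem.List.sorted ((history.filter (fun h =>
            decide (start ≤ pvTs h) && (decide (end_ = 0) || decide (pvTs h ≤ end_)))).map pvTs)
            (fun t => t) false).length ∧
        (PySem.List.sorted ((history.filter (fun h =>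
            decide (start ≤ pvTs h) && (decide (end_ = 0) || decide (pvTs h ≤ end_)))).map pvTs)
            (fun t => t) false).getD
          (PySem.List.bisectLeft
            (PySem.List.sorted ((history.filter (fun h =>
              decide (start ≤ pvTs h) && (decide (end_ = 0) || decide (pvTs h ≤ end_)))).map pvTs)
              (fun t => t) false)
            (pvTs c - win)) 0 ≤ pvTs c + win) := by
  rw [bisect_hit_iff _ _ _ (PySem.List.sorted_pairwise _ _), mem_ts_iff]
  by_cases he : end_ = 0 <;> simp [he]

-- append-if folds with pointwise-equivalent conditions coincide
lemma foldl_if_eq {α : Type} (l : List α) (p q : α → Prop)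
    [DecidablePred p] [DecidablePred q] (hpq : ∀ c, p c ↔ q c) (acc : List α) :
    l.foldl (fun a c => if p c then a ++ [c] else a) acc =
      l.foldl (fun a c => if q c then a ++ [c] else a) acc := by
  induction l generalizing acc with
  | nil => rfl
  | cons c cs ih =>
    simp only [List.foldl_cons]
    rw [if_congr (hpq c) rfl rfl]
    exact ih _

-- the two folds agree once the per-cookie conditions agree
lemma folds_eq (history : List (List Int)) (cookies : List (List Int))
    (start end_ win : Int) :
    analyzeTimestamps history cookies start end_ win =
      analyzeTimestamps_alt history cookies start end_ win := by
  unfold analyzeTimestamps analyzeTimestamps_alt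
  exact foldl_if_eq cookies _ _ (cond_iff history start end_ win) []

-- ===== VERDICT (by name: the statement is the Claim_ definition above) =====
theorem analyzeTimestamps_spec : Claim_equal_analyzeTimestamps := by
  intro history cookies start end_ win _ _
  unfold Spec_analyzeTimestamps
  exact folds_eq history cookies start end_ win
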